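-- pv_equiv track=rewrite | github.com/raymond212/arduino-autonomous-pathfinder | pathfinder_py/pathfinder_functions.py | convert_path_to_instructions
-- ===== SOURCE A (Python) =====
-- def convert_path_to_instructions(path, start_dir, end_dir):
--     cur_dir = start_dir
--     instructions = []
--
--     for i in range(len(path) - 1):
--         dx = path[i + 1][0] - path[i][0]
--         dy = path[i + 1][1] - path[i][1]
--         if dx == 0 and dy == 1:
--             target_dir = 1
--         elif dx == 1 and dy == 0:
--             target_dir = 2
--         elif dx == 0 and dy == -1:
--             target_dir = 3
--         else:
--             target_dir = 0
--
--         # rotate to correct direction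
--         turn_type, turn_num = calculate_turns(cur_dir, target_dir)
--         instructions.extend([turn_type for _ in range(turn_num)])
--
--         # move forward
--         instructions.append("F")
--
--         # update direction
--         cur_dir = target_dir
--
--     # rotate to correct direction in the end
--     turn_type, turn_num = calculate_turns(cur_dir, end_dir)
--     instructions.extend([turn_type for _ in range(turn_num)])
--
--     return instructions
--
-- def calculate_turns(cur_dir, target_dir):
--     left_turn_num = (cur_dir - target_dir) % 4
--     right_turn_num = (target_dir - cur_dir) % 4
--     if left_turn_num < right_turn_num:
--         return "L", left_turn_num
--     else:
--         return "R", right_turn_num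
-- ===== SOURCE B (Python) =====
-- def calculate_turns(cur_dir, target_dir):
--     left_turn_num = (cur_dir - target_dir) % 4
--     right_turn_num = (target_dir - cur_dir) % 4
--     if left_turn_num < right_turn_num:
--         return "L", left_turn_num
--     else:
--         return "R", right_turn_num
--
-- _STEP_DIR = {(0, 1): 1, (1, 0): 2, (0, -1): 3}
--
-- def convert_path_to_instructions(path, start_dir, end_dir):
--     # pass 1: the full sequence of headings, from start_dir to end_dir
--     dirs = [start_dir]
--     for (x0, y0), (x1, y1) in zip(path, path[1:]):
--         dirs.append(_STEP_DIR.get((x1 - x0, y1 - y0), 0))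
--     dirs.append(end_dir)
--     # pass 2: translate adjacent heading pairs; 'F' after each except the terminal rotation
--     out = []
--     for i, (a, b) in enumerate(zip(dirs, dirs[1:])):
--         t, n = calculate_turns(a, b)
--         out.extend([t] * n)
--         if i < len(dirs) - 2:
--             out.append("F")
--     return out
-- ===== Notes on version B (the rewrite author's own statement) =====
-- stated objective: alternative
-- what changed: A's single interleaved loop (index-based, carrying cur_dir and emitting turns+'F' as it goes, with a trailing final rotation) is replaced by two passes: first build the full headings list [start_dir, step directions from a (dx,dy)->dir dict with default 0, end_dir], then translate each adjacent heading pair with calculate_turns, appending 'F' after every pair except the terminal rotation.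
import Mathlib
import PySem

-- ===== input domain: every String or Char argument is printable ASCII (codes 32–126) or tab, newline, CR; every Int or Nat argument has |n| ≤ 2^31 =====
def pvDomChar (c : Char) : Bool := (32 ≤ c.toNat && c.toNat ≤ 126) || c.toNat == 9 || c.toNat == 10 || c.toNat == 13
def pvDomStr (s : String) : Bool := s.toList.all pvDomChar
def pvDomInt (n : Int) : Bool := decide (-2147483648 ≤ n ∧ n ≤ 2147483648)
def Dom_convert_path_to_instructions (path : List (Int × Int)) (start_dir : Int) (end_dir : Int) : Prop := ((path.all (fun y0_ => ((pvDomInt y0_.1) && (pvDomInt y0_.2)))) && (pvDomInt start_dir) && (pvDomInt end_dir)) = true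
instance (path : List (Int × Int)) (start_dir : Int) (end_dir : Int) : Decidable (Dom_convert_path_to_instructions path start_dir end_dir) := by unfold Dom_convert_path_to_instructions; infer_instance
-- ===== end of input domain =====

-- B replaces A's single interleaved loop by two passes (a headings list built from a (dx,dy)->dir table, then a pair-translation pass); objective: alternative decomposition, same cost.


-- ===== PORT A =====
-- shared module helper calculate_turns (used verbatim by both Pythons)
def calculate_turns (cur_dir target_dir : Int) : String × Int :=
  let left_turn_num := PySem.Int.mod (cur_dir - target_dir) 4
  let right_turn_num := PySem.Int.mod (target_dir - cur_dir) 4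
  if left_turn_num < right_turn_num then ("L", left_turn_num) else ("R", right_turn_num)

-- body of A's `for i in range(len(path)-1)` loop; indices i, i+1 are always in range there,
-- so `getD` with a dummy default is exact
def convAStep (path : List (Int × Int)) (st : Int × List String) (i : Nat) : Int × List String :=
  let dx := (path.getD (i + 1) (0, 0)).1 - (path.getD i (0, 0)).1
  let dy := (path.getD (i + 1) (0, 0)).2 - (path.getD i (0, 0)).2
  let target_dir : Int :=
    if dx == 0 && dy == 1 then 1
    else if dx == 1 && dy == 0 then 2
    else if dx == 0 && dy == -1 then 3
    else 0
  let p := calculate_turns st.1 target_dir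
  (target_dir, st.2 ++ List.replicate p.2.toNat p.1 ++ ["F"])

def convert_path_to_instructions (path : List (Int × Int)) (start_dir : Int) (end_dir : Int) : List String :=
  let st := (List.range (path.length - 1)).foldl (convAStep path) (start_dir, [])
  let p := calculate_turns st.1 end_dir
  st.2 ++ List.replicate p.2.toNat p.1

-- ===== PORT B =====
def step_dir_table : PySem.Dict (Int × Int) Int :=
  PySem.Dict.ofList [((0, 1), 1), ((1, 0), 2), ((0, -1), 3)]

-- body of B's second loop: translate one enumerated heading pair; 'F' unless it is the last pair
def convBStep (last : Int) (out : List String) (ip : Int × (Int × Int)) : List String :=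
  let p := calculate_turns ip.2.1 ip.2.2
  let out := out ++ List.replicate p.2.toNat p.1
  if ip.1 < last then out ++ ["F"] else out

def convert_path_to_instructions_alt (path : List (Int × Int)) (start_dir : Int) (end_dir : Int) : List String :=
  let dirs := start_dir ::
    ((path.zip path.tail).map
      (fun pq => step_dir_table.getD (pq.2.1 - pq.1.1, pq.2.2 - pq.1.2) 0) ++ [end_dir])
  (PySem.List.enumerate (dirs.zip dirs.tail)).foldl (convBStep ((dirs.length : Int) - 2)) []

-- ===== PRECONDITION & SPEC =====
def Spec_convert_path_to_instructions (path : List (Int × Int)) (start_dir : Int) (end_dir : Int) (out : List String) : Prop := out = convert_path_to_instructions_alt path start_dir end_dir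
instance (path : List (Int × Int)) (start_dir : Int) (end_dir : Int) (out : List String) : Decidable (Spec_convert_path_to_instructions path start_dir end_dir out) := by unfold Spec_convert_path_to_instructions; infer_instance

-- ===== CLAIM (what is proved, stated in full; the proofs are below) =====
def Claim_equal_convert_path_to_instructions : Prop := ∀ (path : List (Int × Int)) (start_dir : Int) (end_dir : Int), Dom_convert_path_to_instructions path start_dir end_dir → Spec_convert_path_to_instructions path start_dir end_dir (convert_path_to_instructions path start_dir end_dir)

-- ===== LEMMAS AND PROOFS =====

-- the turn prefix rotating from a to b
def turnsL (a b : Int) : List String :=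
  let p := calculate_turns a b
  List.replicate p.2.toNat p.1

-- A's direction formula for one step
def dirStep (p q : Int × Int) : Int :=
  let dx := q.1 - p.1
  let dy := q.2 - p.2
  if dx == 0 && dy == 1 then 1
  else if dx == 1 && dy == 0 then 2
  else if dx == 0 && dy == -1 then 3
  else 0

def dirsOf (path : List (Int × Int)) : List Int :=
  (path.zip path.tail).map (fun pq => dirStep pq.1 pq.2)

-- reference function: translate heading a followed by heading list ds
def gRef : Int → List Int → List String
  | _, [] => []
  | a, [b] => turnsL a b
  | a, b :: c :: rest => turnsL a b ++ "F" :: gRef b (c :: rest)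

theorem table_eq_dirStep (p q : Int × Int) :
    step_dir_table.getD (q.1 - p.1, q.2 - p.2) 0 = dirStep p q := by
  have h : step_dir_table = PySem.Dict.mk [((0, 1), 1), ((1, 0), 2), ((0, -1), 3)] := by decide
  rw [h]
  simp only [PySem.Dict.getD, PySem.Dict.get?_mk_cons, dirStep]
  have hbeq : ∀ (a b x y : Int), (((a, b) : Int × Int) == (x, y)) = (x == a && y == b) := by
    intro a b x y
    rw [Bool.eq_iff_iff]
    simp only [Bool.and_eq_true, beq_iff_eq, Prod.mk.injEq]
    constructor <;> rintro ⟨h1, h2⟩ <;> exact ⟨h1.symm, h2.symm⟩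
  simp only [hbeq]
  split_ifs <;> simp_all [PySem.Dict.get?]

-- instruction accumulator of the A-loop is prefix-compositional
theorem foldA_pre (idxs : List Nat) (path : List (Int × Int)) :
    ∀ (c : Int) (pre : List String),
      idxs.foldl (convAStep path) (c, pre) =
        ((idxs.foldl (convAStep path) (c, [])).1,
          pre ++ (idxs.foldl (convAStep path) (c, [])).2) := by
  induction idxs with
  | nil => intro c pre; simp
  | cons i t ih =>
      intro c pre
      simp only [List.foldl_cons]
      rw [show convAStep path (c, pre) i =
            ((convAStep path (c, []) i).1, pre ++ (convAStep path (c, []) i).2) from by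
            simp [convAStep]]
      rw [ih (convAStep path (c, []) i).1 (pre ++ (convAStep path (c, []) i).2),
          ih (convAStep path (c, []) i).1 (convAStep path (c, []) i).2]
      cases h : convAStep path (c, []) i with
      | mk d out => simp [List.append_assoc]

theorem convA_cons (p0 p1 : Int × Int) (rest : List (Int × Int)) (s e : Int) :
    convert_path_to_instructions (p0 :: p1 :: rest) s e =
      turnsL s (dirStep p0 p1) ++
        "F" :: convert_path_to_instructions (p1 :: rest) (dirStep p0 p1) e := by
  simp only [convert_path_to_instructions, List.length_cons, Nat.add_sub_cancel]
  rw [List.range_succ_eq_map]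
  simp only [List.foldl_cons, List.foldl_map]
  have hstep : ∀ (st : Int × List String) (i : Nat),
      convAStep (p0 :: p1 :: rest) st (i + 1) = convAStep (p1 :: rest) st i := by
    intro st i; simp [convAStep]
  have hfun : (fun (st : Int × List String) (i : Nat) =>
      convAStep (p0 :: p1 :: rest) st i.succ) = convAStep (p1 :: rest) := by
    funext st i; exact hstep st i
  rw [hfun]
  have hfirst : convAStep (p0 :: p1 :: rest) (s, []) 0 =
      (dirStep p0 p1, turnsL s (dirStep p0 p1) ++ ["F"]) := by
    simp [convAStep, dirStep, turnsL]
  rw [hfirst]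
  rw [foldA_pre (List.range rest.length) (p1 :: rest) (dirStep p0 p1)
      (turnsL s (dirStep p0 p1) ++ ["F"])]
  simp [List.append_assoc]

theorem convA_eq_gRef (path : List (Int × Int)) (s e : Int) :
    convert_path_to_instructions path s e = gRef s (dirsOf path ++ [e]) := by
  induction path generalizing s with
  | nil => simp [convert_path_to_instructions, dirsOf, gRef, turnsL]
  | cons p0 t ih =>
      cases t with
      | nil => simp [convert_path_to_instructions, dirsOf, gRef, turnsL]
      | cons p1 rest =>
          rw [convA_cons, ih]
          have hd : dirsOf (p0 :: p1 :: rest) = dirStep p0 p1 :: dirsOf (p1 :: rest) := by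
            simp [dirsOf]
          rw [hd]
          cases h : dirsOf (p1 :: rest) with
          | nil => simp [gRef]
          | cons x xs => simp [gRef]

theorem foldB (ds : List Int) :
    ∀ (a : Int) (st : Int) (out : List String) (last : Int),
      last = st + (ds.length : Int) - 1 →
      (PySem.List.enumerate ((a :: ds).zip ds) st).foldl (convBStep last) out =
        out ++ gRef a ds := by
  induction ds with
  | nil => intro a st out last _; simp [gRef]
  | cons b rest ih =>
      intro a st out last hl
      rw [show (a :: b :: rest).zip (b :: rest) = (a, b) :: ((b :: rest).zip rest) from rfl]
      rw [PySem.List.enumerate_cons]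
      simp only [List.foldl_cons]
      cases rest with
      | nil =>
          have hnlt : ¬ (st < last) := by simp at hl; omega
          simp [convBStep, hnlt, gRef, turnsL]
      | cons c r =>
          have hlt : st < last := by simp [List.length_cons] at hl; omega
          rw [show convBStep last out (st, (a, b)) = out ++ turnsL a b ++ ["F"] from by
            simp [convBStep, turnsL, hlt]]
          rw [ih b (st + 1) (out ++ turnsL a b ++ ["F"]) last (by simp at hl ⊢; omega)]
          simp [gRef, List.append_assoc]

theorem convB_eq_gRef (path : List (Int × Int)) (s e : Int) :
    convert_path_to_instructions_alt path s e = gRef s (dirsOf path ++ [e]) := by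
  simp only [convert_path_to_instructions_alt, table_eq_dirStep]
  rw [show (path.zip path.tail).map (fun pq => dirStep pq.1 pq.2) = dirsOf path from rfl]
  rw [show (s :: (dirsOf path ++ [e])).tail = dirsOf path ++ [e] from rfl]
  rw [foldB (dirsOf path ++ [e]) s 0 [] _ (by simp; omega)]
  simp

-- ===== VERDICT (by name: the statement is the Claim_ definition above) =====
theorem convert_path_to_instructions_spec : Claim_equal_convert_path_to_instructions := by
  intro path s e _
  unfold Spec_convert_path_to_instructions
  rw [convA_eq_gRef, convB_eq_gRef]
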